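-- pv_equiv track=rewrite | github.com/tommoseley/TheCombine | app/web/routes/public/intake_workflow_routes.py | _clean_problem_statement
-- ===== SOURCE A (Python) =====
-- def _clean_problem_statement(text: str) -> str:
--     """Mechanically strip 'The user wants to...' style prefixes from summary.description.
--
--     This is a deterministic transformation, not LLM-based.
--     """
--     if not text:
--         return ""
--
--     # Common prefixes to strip (case-insensitive matching)
--     prefixes_to_strip = [
--         "The user wants to ",
--         "The user wants ",
--         "User wants to ",
--         "User wants ",
--         "The user is requesting ",
--         "The user would like to ",
--         "The user needs to ",
--         "The user needs ",
--         "This request is for ",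
--         "This is a request for ",
--         "The request is to ",
--     ]
--
--     result = text.strip()
--     for prefix in prefixes_to_strip:
--         if result.lower().startswith(prefix.lower()):
--             result = result[len(prefix):]
--             # Capitalize first letter after stripping
--             if result:
--                 result = result[0].upper() + result[1:]
--             break
--
--     return result
-- ===== SOURCE B (Python) =====
-- # B: instead of scanning the prefix list for the first match, pick the longest
-- # matching prefix (the prefix set is prefix-closed ordered longest-first, so
-- # first-match and longest-match coincide); prefixes are stored pre-lowercased.
-- _PREFIXES = (
--     "the user wants to ",
--     "the user wants ",
--     "user wants to ",
--     "user wants ",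
--     "the user is requesting ",
--     "the user would like to ",
--     "the user needs to ",
--     "the user needs ",
--     "this request is for ",
--     "this is a request for ",
--     "the request is to ",
-- )
--
--
-- def _clean_problem_statement(text: str) -> str:
--     if not text:
--         return ""
--     result = text.strip()
--     low = result.lower()
--     n = max((len(p) for p in _PREFIXES if low.startswith(p)), default=0)
--     if n == 0:
--         return result
--     rest = result[n:]
--     return rest[:1].upper() + rest[1:]
-- ===== Notes on version B (the rewrite author's own statement) =====
-- stated objective: alternative
-- what changed: A scans the prefix list in order and strips the first case-insensitive match; B pre-lowercases the prefixes and strips the longest matching prefix (max over matched lengths), which coincides with A's first-match because no earlier prefix is a prefix of a later one.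
import Mathlib
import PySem

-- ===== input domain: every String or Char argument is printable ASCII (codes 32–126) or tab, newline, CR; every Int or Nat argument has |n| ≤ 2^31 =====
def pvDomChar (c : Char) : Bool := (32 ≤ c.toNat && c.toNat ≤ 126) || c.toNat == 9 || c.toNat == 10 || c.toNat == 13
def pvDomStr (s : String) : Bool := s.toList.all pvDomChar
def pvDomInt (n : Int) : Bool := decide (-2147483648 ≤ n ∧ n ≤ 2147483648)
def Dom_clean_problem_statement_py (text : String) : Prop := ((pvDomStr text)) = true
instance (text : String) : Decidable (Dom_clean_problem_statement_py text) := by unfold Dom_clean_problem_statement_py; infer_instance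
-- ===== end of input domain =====

-- B replaces A's ordered first-match scan over the prefix list by a longest-match rule over
-- pre-lowercased prefixes (objective: alternative; the prefix list is ordered longest-first
-- within overlapping families, so the two selection rules agree).

-- ===== PORT A =====
def pvPrefixesA : List (List Char) :=
  ["The user wants to ".toList,
   "The user wants ".toList,
   "User wants to ".toList,
   "User wants ".toList,
   "The user is requesting ".toList,
   "The user would like to ".toList,
   "The user needs to ".toList,
   "The user needs ".toList,
   "This request is for ".toList,
   "This is a request for ".toList,
   "The request is to ".toList]

-- 'if result: result = result[0].upper() + result[1:]'
def pvCapA (r : List Char) : List Char :=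
  match r with
  | [] => r
  | c :: cs => PySem.Chars.upper [c] ++ cs

-- the for-loop: first prefix with result.lower().startswith(prefix.lower()) wins, then break
def pvLoopA (result : List Char) : List (List Char) → List Char
  | [] => result
  | p :: ps =>
    if PySem.Chars.startswith (PySem.Chars.lower result) (PySem.Chars.lower p) then
      pvCapA (PySem.List.slice result (some (p.length : Int)) none)   -- result[len(prefix):]
    else pvLoopA result ps

def clean_problem_statement_py (text : String) : String :=
  if text.toList = [] then ""                      -- 'if not text: return ""'
  else String.ofList (pvLoopA (PySem.Chars.strip text.toList) pvPrefixesA)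

-- ===== PORT B =====
def pvPrefixesB : List (List Char) :=
  ["the user wants to ".toList,
   "the user wants ".toList,
   "user wants to ".toList,
   "user wants ".toList,
   "the user is requesting ".toList,
   "the user would like to ".toList,
   "the user needs to ".toList,
   "the user needs ".toList,
   "this request is for ".toList,
   "this is a request for ".toList,
   "the request is to ".toList]

-- 'rest[:1].upper() + rest[1:]'
def pvCapB (rest : List Char) : List Char :=
  PySem.Chars.upper (PySem.List.slice rest none (some 1)) ++ PySem.List.slice rest (some 1) none

def clean_problem_statement_py_alt (text : String) : String :=
  if text.toList = [] then ""
  else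
    let result := PySem.Chars.strip text.toList
    let low := PySem.Chars.lower result
    -- n = max((len(p) for p in _PREFIXES if low.startswith(p)), default=0)
    let n := PySem.List.maxD
      ((pvPrefixesB.filter (fun p => PySem.Chars.startswith low p)).map List.length)
      (fun k => k) 0
    if n = 0 then String.ofList result
    else String.ofList (pvCapB (PySem.List.slice result (some (n : Int)) none))

-- ===== PRECONDITION & SPEC =====
def Spec_clean_problem_statement_py (text : String) (out : String) : Prop := out = clean_problem_statement_py_alt text
instance (text : String) (out : String) : Decidable (Spec_clean_problem_statement_py text out) := by unfold Spec_clean_problem_statement_py; infer_instance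

-- ===== CLAIM (what is proved, stated in full; the proofs are below) =====
def Claim_equal_clean_problem_statement_py : Prop := ∀ (text : String), Dom_clean_problem_statement_py text → Spec_clean_problem_statement_py text (clean_problem_statement_py text)

-- ===== LEMMAS AND PROOFS =====

-- A's guarded capitalization equals B's slice-based one
lemma pvCap_eq (r : List Char) : pvCapA r = pvCapB r := by
  cases r with
  | nil => simp [pvCapA, pvCapB, pysem, PySem.Chars.upper]
  | cons c cs =>
      have h1 : PySem.List.slice (c :: cs) none (some 1) = [c] := by simp [pysem]
      have h2 : PySem.List.slice (c :: cs) (some 1) none = cs := by simp [pysem]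
      simp [pvCapA, pvCapB, h1, h2]

-- max with default over a head-dominated list returns the head
lemma pvMaxD_head (a : Nat) (l : List Nat) (h : ∀ x ∈ l, x ≤ a) :
    PySem.List.maxD (a :: l) (fun k => k) 0 = a := by
  simp only [PySem.List.maxD, PySem.List.max?_id_cons, Option.getD_some]
  have hle : a ≤ l.foldl max a := (PySem.List.le_foldl_max l a).1
  rcases PySem.List.foldl_max_mem l a with h1 | h1
  · exact h1
  · exact Nat.le_antisymm (h _ h1) hle

lemma pvLower_length (p : List Char) : (PySem.Chars.lower p).length = p.length := by
  simp [PySem.Chars.lower]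

-- core: the first-match loop over L equals the longest-match rule over L.map lower,
-- whenever no (lowered) prefix in L is a prefix of a later one and none is empty
lemma pvLoop_eq (rs : List Char) (L : List (List Char))
    (hpw : L.Pairwise (fun p q => ¬ PySem.Chars.lower p <+: PySem.Chars.lower q))
    (hne : ∀ p ∈ L, p ≠ []) :
    pvLoopA rs L =
      (let low := PySem.Chars.lower rs
       let n := PySem.List.maxD
         (((L.map PySem.Chars.lower).filter (fun p => PySem.Chars.startswith low p)).map List.length)
         (fun k => k) 0
       if n = 0 then rs else pvCapB (PySem.List.slice rs (some (n : Int)) none)) := by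
  induction L with
  | nil => simp [pvLoopA, PySem.List.maxD, PySem.List.max?]
  | cons p ps ih =>
      have hpwtail := (List.pairwise_cons.mp hpw).2
      have hpwhead := (List.pairwise_cons.mp hpw).1
      by_cases h : PySem.Chars.startswith (PySem.Chars.lower rs) (PySem.Chars.lower p) = true
      · -- first prefix matches: A strips it; B's max is exactly its length
        have hp : PySem.Chars.lower p <+: PySem.Chars.lower rs :=
          (PySem.Chars.startswith_iff _ _).mp h
        have hmax : ∀ x ∈ ((ps.map PySem.Chars.lower).filter
            (fun q => PySem.Chars.startswith (PySem.Chars.lower rs) q)).map List.length,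
            x ≤ (PySem.Chars.lower p).length := by
          intro x hx
          obtain ⟨q, hq, rfl⟩ := List.mem_map.mp hx
          obtain ⟨hqmem, hqmatch⟩ := List.mem_filter.mp hq
          obtain ⟨q0, hq0, rfl⟩ := List.mem_map.mp hqmem
          have hq' : PySem.Chars.lower q0 <+: PySem.Chars.lower rs :=
            (PySem.Chars.startswith_iff _ _).mp hqmatch
          rcases List.prefix_or_prefix_of_prefix hp hq' with hc | hc
          · exact absurd hc (hpwhead q0 hq0)
          · exact hc.length_le
        have hn0 : p.length ≠ 0 := by
          intro h0
          exact hne p (by simp) (List.eq_nil_of_length_eq_zero h0)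
        simp only [pvLoopA, if_pos, List.map_cons, List.filter_cons, h]
        rw [pvMaxD_head _ _ hmax, pvLower_length, if_neg hn0, pvCap_eq]
      · -- no match on the head: drop it on both sides
        have hfilter : ((p :: ps).map PySem.Chars.lower).filter
            (fun q => PySem.Chars.startswith (PySem.Chars.lower rs) q)
            = (ps.map PySem.Chars.lower).filter
              (fun q => PySem.Chars.startswith (PySem.Chars.lower rs) q) := by
          simp [List.filter_cons, h]
        simp only [pvLoopA, h, if_neg, Bool.not_eq_true]
        rw [ih hpwtail (fun q hq => hne q (List.mem_cons_of_mem _ hq))]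
        simp only [hfilter]
  
-- the two concrete prefix lists: B's is the lowering of A's
lemma pvPrefixesB_eq : pvPrefixesB = pvPrefixesA.map PySem.Chars.lower := by decide

lemma pvPrefixesA_pairwise :
    pvPrefixesA.Pairwise (fun p q => ¬ PySem.Chars.lower p <+: PySem.Chars.lower q) := by decide

lemma pvPrefixesA_ne_nil : ∀ p ∈ pvPrefixesA, p ≠ [] := by decide

-- ===== VERDICT (by name: the statement is the Claim_ definition above) =====
theorem clean_problem_statement_py_spec : Claim_equal_clean_problem_statement_py := by
  intro text _
  unfold Spec_clean_problem_statement_py clean_problem_statement_py clean_problem_statement_py_alt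
  by_cases hnil : text.toList = []
  · simp [hnil]
  · simp only [hnil, ite_false]
    rw [pvLoop_eq (PySem.Chars.strip text.toList) pvPrefixesA pvPrefixesA_pairwise pvPrefixesA_ne_nil]
    rw [pvPrefixesB_eq]
    simp only [apply_ite String.ofList]
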